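-- pv_equiv track=rewrite | github.com/hannaheptapod/atco | hackerrank/2023-6/15.py | solve
-- ===== SOURCE A (Python) =====
-- def solve(n, k):
--     if k == 0:
--         return list(range(1, n+1))
--     elif k == 1 and n % 2 == 0:
--         return [i+1 if (i+1)%2==0 else i-1 for i in range(1, n+1)]
--     elif n % (2*k) == 0:
--         return [i+k if ((i-1)//k)%2==0 else i-k for i in range(1, n+1)]
--     else:
--         return [-1]
-- ===== SOURCE B (Python) =====
-- def solve(n, k):
--     if k == 0:
--         return list(range(1, n+1))
--     if n % (2*k) != 0:
--         return [-1]
--     res = []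
--     for s in range(0, n, 2*k):
--         res.extend(range(s+k+1, s+2*k+1))
--         res.extend(range(s+1, s+k+1))
--     return res
-- ===== Notes on version B (the rewrite author's own statement) =====
-- stated objective: simpler
-- what changed: B builds the answer block-by-block as contiguous ranges (for each block start s it appends range(s+k+1,s+2k+1) then range(s+1,s+k+1)) instead of A's per-index +k/-k offset computed from (i-1)//k parity, and drops A's redundant 'k==1 and n even' special branch.
-- outside the precondition, e.g. on solve(4, -2): A returns [-1, 4, 5, 2], B returns []
import Mathlib
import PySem

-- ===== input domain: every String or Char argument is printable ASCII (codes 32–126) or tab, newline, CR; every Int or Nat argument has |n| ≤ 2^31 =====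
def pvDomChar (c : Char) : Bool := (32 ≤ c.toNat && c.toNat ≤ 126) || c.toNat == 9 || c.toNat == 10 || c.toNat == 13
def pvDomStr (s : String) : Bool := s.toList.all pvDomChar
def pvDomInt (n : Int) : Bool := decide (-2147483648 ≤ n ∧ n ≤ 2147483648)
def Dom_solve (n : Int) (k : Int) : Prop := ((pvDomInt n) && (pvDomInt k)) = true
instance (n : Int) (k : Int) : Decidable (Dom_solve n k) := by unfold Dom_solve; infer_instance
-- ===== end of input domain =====

-- B constructs the permutation block-by-block from contiguous ranges instead of A's
-- per-index +k/-k offset formula, and drops A's redundant k==1 branch (objective: simpler).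


-- ===== PORT A =====
def solve (n : Int) (k : Int) : List Int :=
  if k = 0 then
    PySem.List.pyRange 1 (n+1) 1
  else if k = 1 ∧ PySem.Int.mod n 2 = 0 then
    (PySem.List.pyRange 1 (n+1) 1).map
      (fun i => if PySem.Int.mod (i+1) 2 = 0 then i+1 else i-1)
  else if PySem.Int.mod n (2*k) = 0 then
    (PySem.List.pyRange 1 (n+1) 1).map
      (fun i => if PySem.Int.mod (PySem.Int.floordiv (i-1) k) 2 = 0 then i+k else i-k)
  else
    [-1]

-- ===== PORT B =====
def solve_alt (n : Int) (k : Int) : List Int :=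
  if k = 0 then
    PySem.List.pyRange 1 (n+1) 1
  else if PySem.Int.mod n (2*k) ≠ 0 then
    [-1]
  else
    (PySem.List.pyRange 0 n (2*k)).foldl
      (fun res s =>
        (res ++ PySem.List.pyRange (s+k+1) (s+2*k+1) 1) ++ PySem.List.pyRange (s+1) (s+k+1) 1)
      []

-- ===== PRECONDITION & SPEC =====
-- Pre_ excludes only negative k with 2k dividing a positive n, outside the problem's natural
-- domain (k is an absolute distance), where A's floor-division arithmetic returns an accidental
-- non-permutation value that B does not reproduce.
def Pre_solve (n : Int) (k : Int) : Prop := 0 ≤ k ∨ n ≤ 0 ∨ PySem.Int.mod n (2*k) ≠ 0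
instance (n : Int) (k : Int) : Decidable (Pre_solve n k) := by unfold Pre_solve; infer_instance
def pvWitness_solve : Int × Int := (4, 2)

def Spec_solve (n : Int) (k : Int) (out : List Int) : Prop := out = solve_alt n k
instance (n : Int) (k : Int) (out : List Int) : Decidable (Spec_solve n k out) := by unfold Spec_solve; infer_instance

-- ===== CLAIM (what is proved, stated in full; the proofs are below) =====
def Claim_equal_solve : Prop := ∀ (n : Int) (k : Int), Dom_solve n k → Pre_solve n k → Spec_solve n k (solve n k)

-- ===== LEMMAS AND PROOFS =====

-- shifting a unit range by a constant
theorem pv_range_shift (a b c : Int) :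
    (PySem.List.pyRange a b 1).map (fun i => i + c) = PySem.List.pyRange (a+c) (b+c) 1 := by
  rw [PySem.List.pyRange_one, PySem.List.pyRange_one, List.map_map]
  congr 1
  · funext j; simp; ring
  · congr 1; omega

-- a positive-step range from 0 grows by one element at the right end
theorem pv_pyRange_step_snoc (K : Int) (hK : 0 < K) (m : Nat) :
    PySem.List.pyRange 0 (K*((m:Int)+1)) K = PySem.List.pyRange 0 (K*(m:Int)) K ++ [K*(m:Int)] := by
  rw [PySem.List.pyRange_of_pos _ _ hK, PySem.List.pyRange_of_pos _ _ hK]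
  have h1 : (0:Int) < K*((m:Int)+1) := by positivity
  rw [if_pos h1]
  have hc : ∀ j : Nat, 0 < j → ((K*(j:Int) - 0 + K - 1)/K).toNat = j := by
    intro j hj
    have he : K*(j:Int) - 0 + K - 1 = (K - 1) + (j:Int)*K := by ring
    rw [he, Int.add_mul_ediv_right _ _ (by omega), Int.ediv_eq_zero_of_lt (by omega) (by omega)]
    omega
  have h2 : K*((m:Int)+1) = K*(((m+1:Nat)):Int) := by push_cast; ring
  rw [h2, hc (m+1) (by omega)]
  by_cases hm : 0 < m
  · have hKm : (0:Int) < K*(m:Int) := by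
      have : (0:Int) < (m:Int) := by exact_mod_cast hm
      positivity
    rw [if_pos hKm, hc m hm, List.range_succ, List.map_append]
    simp
  · have hm0 : m = 0 := by omega
    subst hm0
    simp [List.range_succ]

-- one block of A's offset map is the pair of contiguous ranges B appends
theorem pv_block (k : Int) (hk : 0 < k) (m : Nat) :
    (PySem.List.pyRange (2*k*(m:Int)+1) (2*k*(m:Int)+2*k+1) 1).map
      (fun i => if PySem.Int.mod (PySem.Int.floordiv (i-1) k) 2 = 0 then i+k else i-k)
    = PySem.List.pyRange (2*k*(m:Int)+k+1) (2*k*(m:Int)+2*k+1) 1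
      ++ PySem.List.pyRange (2*k*(m:Int)+1) (2*k*(m:Int)+k+1) 1 := by
  set s : Int := 2*k*(m:Int) with hs
  rw [PySem.List.pyRange_one_append (s+1) (s+k+1) (s+2*k+1) (by omega) (by omega),
      List.map_append]
  have e1 : (2*(m:Int))*k = s := by rw [hs]; ring
  have e2 : (2*(m:Int)+1)*k = s + k := by rw [hs]; ring
  have e3 : (2*(m:Int)+2)*k = s + 2*k := by rw [hs]; ring
  congr 1
  · have hcg : ∀ i ∈ PySem.List.pyRange (s+1) (s+k+1) 1,
        (if PySem.Int.mod (PySem.Int.floordiv (i-1) k) 2 = 0 then i+k else i-k) = i + k := by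
      intro i hi
      rw [PySem.List.mem_pyRange_one] at hi
      have hf : PySem.Int.floordiv (i-1) k = 2*(m:Int) := by
        rw [PySem.Int.floordiv_eq_iff_of_pos hk]
        constructor
        · linarith [e1]
        · linarith [e2]
      rw [hf]
      have : PySem.Int.mod (2*(m:Int)) 2 = 0 := by
        rw [PySem.Int.mod_eq_zero_iff_dvd]; exact ⟨(m:Int), rfl⟩
      rw [if_pos this]
    rw [List.map_congr_left hcg, pv_range_shift]
    congr 1 <;> ring
  · have hcg : ∀ i ∈ PySem.List.pyRange (s+k+1) (s+2*k+1) 1,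
        (if PySem.Int.mod (PySem.Int.floordiv (i-1) k) 2 = 0 then i+k else i-k) = i + (-k) := by
      intro i hi
      rw [PySem.List.mem_pyRange_one] at hi
      have hf : PySem.Int.floordiv (i-1) k = 2*(m:Int)+1 := by
        rw [PySem.Int.floordiv_eq_iff_of_pos hk]
        constructor
        · linarith [e2]
        · linarith [e3]
      rw [hf]
      have : PySem.Int.mod (2*(m:Int)+1) 2 ≠ 0 := by
        rw [PySem.Int.mod_eq_emod_of_pos (by omega)]; omega
      rw [if_neg this]
      ring
    rw [List.map_congr_left hcg, pv_range_shift]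
    congr 1 <;> ring

-- A's offset map over 1..2km equals B's block fold
theorem pv_fold_eq (k : Int) (hk : 0 < k) (m : Nat) :
    (PySem.List.pyRange 1 (2*k*(m:Int)+1) 1).map
      (fun i => if PySem.Int.mod (PySem.Int.floordiv (i-1) k) 2 = 0 then i+k else i-k)
    = (PySem.List.pyRange 0 (2*k*(m:Int)) (2*k)).foldl
        (fun res s =>
          (res ++ PySem.List.pyRange (s+k+1) (s+2*k+1) 1) ++ PySem.List.pyRange (s+1) (s+k+1) 1)
        [] := by
  induction m with
  | zero =>
    simp [PySem.List.pyRange_one_eq_nil (by omega : (1:Int) ≤ 1),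
          PySem.List.pyRange_of_pos (0:Int) 0 (by omega : (0:Int) < 2*k)]
  | succ m ih =>
    have hmn : (0:Int) ≤ 2*k*(m:Int) := by positivity
    have hend : 2*k*((m:Int)+1)+1 = (2*k*(m:Int)+2*k+1) := by ring
    have hKsnoc := pv_pyRange_step_snoc (2*k) (by omega) m
    push_cast
    rw [hend,
        PySem.List.pyRange_one_append 1 (2*k*(m:Int)+1) (2*k*(m:Int)+2*k+1) (by omega) (by omega),
        List.map_append, hKsnoc, List.foldl_append, ← ih, pv_block k hk m]
    simp [List.append_assoc]

-- the divisible case, full: A's third-branch list equals B's fold, for every n with 2k ∣ n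
theorem pv_div_case (n k : Int) (hk : 0 < k) (hd : PySem.Int.mod n (2*k) = 0) :
    (PySem.List.pyRange 1 (n+1) 1).map
      (fun i => if PySem.Int.mod (PySem.Int.floordiv (i-1) k) 2 = 0 then i+k else i-k)
    = (PySem.List.pyRange 0 n (2*k)).foldl
        (fun res s =>
          (res ++ PySem.List.pyRange (s+k+1) (s+2*k+1) 1) ++ PySem.List.pyRange (s+1) (s+k+1) 1)
        [] := by
  rcases (PySem.Int.mod_eq_zero_iff_dvd n (2*k)).mp hd with ⟨t, ht⟩
  by_cases hn : 0 < n
  · have ht0 : 0 < t := by nlinarith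
    have hmt : n = 2*k*((t.toNat : Int)) := by
      rw [ht, Int.toNat_of_nonneg ht0.le]
    rw [hmt]
    exact pv_fold_eq k hk t.toNat
  · rw [PySem.List.pyRange_one_eq_nil (by omega : n + 1 ≤ 1)]
    rw [PySem.List.pyRange_of_pos 0 n (by omega : (0:Int) < 2*k), if_neg (by omega)]
    simp

-- for negative k every inner range of B's fold is empty, so the fold returns []
theorem pv_fold_nil (k : Int) (hk : k < 0) (l : List Int) (acc : List Int) :
    l.foldl
      (fun res s =>
        (res ++ PySem.List.pyRange (s+k+1) (s+2*k+1) 1) ++ PySem.List.pyRange (s+1) (s+k+1) 1)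
      acc = acc := by
  induction l generalizing acc with
  | nil => rfl
  | cons s l ih =>
    rw [List.foldl_cons,
        PySem.List.pyRange_one_eq_nil (by omega : s+2*k+1 ≤ s+k+1),
        PySem.List.pyRange_one_eq_nil (by omega : s+k+1 ≤ s+1)]
    simp only [List.append_nil]
    exact ih acc

-- ===== VERDICT (by name: the statement is the Claim_ definition above) =====
theorem solve_spec : Claim_equal_solve := by
  intro n k _ hpre
  unfold Spec_solve solve solve_alt
  by_cases hk0 : k = 0
  · simp [hk0]
  · rcases lt_or_gt_of_ne (show k ≠ 0 from hk0) with hkneg | hk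
    · -- k < 0: Pre_ gives n ≤ 0 or the modulus is nonzero
      have hb2 : ¬(k = 1 ∧ PySem.Int.mod n 2 = 0) := by rintro ⟨hk1, -⟩; omega
      rw [if_neg hk0, if_neg hk0, if_neg hb2]
      by_cases hd : PySem.Int.mod n (2*k) = 0
      · have hn0 : n ≤ 0 := by
          rcases hpre with h | h | h
          · omega
          · exact h
          · exact absurd hd h
        rw [if_pos hd, if_neg (not_not_intro hd),
            PySem.List.pyRange_one_eq_nil (by omega : n + 1 ≤ 1),
            List.map_nil, pv_fold_nil k hkneg]
      · rw [if_neg hd, if_pos hd]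
    · rw [if_neg hk0, if_neg hk0]
      by_cases hd : PySem.Int.mod n (2*k) = 0
      · rw [if_neg (show ¬ (PySem.Int.mod n (2*k) ≠ 0) from not_not_intro hd)]
        by_cases hb2 : k = 1 ∧ PySem.Int.mod n 2 = 0
        · rw [if_pos hb2]
          obtain ⟨hk1, _⟩ := hb2
          subst hk1
          have hcg : ∀ i ∈ PySem.List.pyRange 1 (n+1) 1,
              (if PySem.Int.mod (i+1) 2 = 0 then i+1 else i-1)
              = (if PySem.Int.mod (PySem.Int.floordiv (i-1) 1) 2 = 0 then i+1 else i-1) := by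
            intro i _
            have hfd : PySem.Int.floordiv (i-1) 1 = i - 1 := by
              rw [PySem.Int.floordiv_eq_ediv_of_pos (by omega)]; omega
            have hm : PySem.Int.mod (i+1) 2 = PySem.Int.mod (i-1) 2 := by
              rw [PySem.Int.mod_eq_emod_of_pos (by omega), PySem.Int.mod_eq_emod_of_pos (by omega)]
              omega
            rw [hfd, hm]
          rw [List.map_congr_left hcg]
          have h := pv_div_case n 1 (by omega) hd
          simpa using h
        · rw [if_neg hb2, if_pos hd]
          exact pv_div_case n k hk hd
      · rw [if_pos hd]
        have hb2 : ¬(k = 1 ∧ PySem.Int.mod n 2 = 0) := by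
          rintro ⟨hk1, hn2⟩
          subst hk1
          apply hd
          rw [show (2:Int)*1 = 2 by norm_num]
          exact hn2
        rw [if_neg hb2, if_neg hd]
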